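-- pv_equiv track=rewrite | github.com/ZrjaK/algorithm | OJ/leetcode/1498.满足条件的子序列数目.py | numSubseq
-- ===== SOURCE A (Python) =====
-- from typing import List
--
-- def numSubseq(nums: List[int], target: int) -> int:
--     nums.sort()
--     l ,r, ans = 0, len(nums)-1, 0
--     while l <= r:
--         if nums[l] + nums[r] > target:
--             r -= 1
--         else:
--             ans += 1<<r-l
--             ans %= int(1e9+7)
--             l += 1
--     return ans
-- ===== SOURCE B (Python) =====
-- from typing import List
-- import bisect
--
-- def numSubseq(nums: List[int], target: int) -> int:
--     nums.sort()
--     MOD = 10**9 + 7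
--     ans = 0
--     for l in range(len(nums)):
--         r = bisect.bisect_right(nums, target - nums[l]) - 1
--         if r >= l:
--             ans = (ans + pow(2, r - l, MOD)) % MOD
--     return ans
-- ===== Notes on version B (the rewrite author's own statement) =====
-- stated objective: alternative
-- what changed: Replaces A's single converging two-pointer sweep with a per-left-element loop that binary-searches (bisect_right) the rightmost valid partner and adds pow(2, r-l, MOD).
import Mathlib
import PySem

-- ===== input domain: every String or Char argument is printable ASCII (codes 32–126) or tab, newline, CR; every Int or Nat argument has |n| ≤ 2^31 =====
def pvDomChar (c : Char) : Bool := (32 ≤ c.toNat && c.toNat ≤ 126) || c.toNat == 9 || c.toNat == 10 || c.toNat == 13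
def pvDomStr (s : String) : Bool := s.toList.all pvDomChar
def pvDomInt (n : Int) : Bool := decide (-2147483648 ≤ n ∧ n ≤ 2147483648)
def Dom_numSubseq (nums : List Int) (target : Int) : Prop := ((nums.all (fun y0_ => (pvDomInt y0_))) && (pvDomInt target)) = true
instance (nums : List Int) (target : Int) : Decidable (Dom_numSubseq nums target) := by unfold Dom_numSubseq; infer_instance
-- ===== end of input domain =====

-- B replaces A's converging two-pointer sweep by a per-left-index loop with a bisect_right
-- binary search for the rightmost valid partner (alternative algorithm, same asymptotic cost).
-- Both A and B sort the argument list in place (same side effect); the theorems are about the return value.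

-- ===== PORT A =====
-- nums[i] for an index known to be in range inside the loop (exact there)
def pvGet (a : List Int) (i : Int) : Int := (PySem.List.pyGet? a i).getD 0

-- the while-loop: l, r, ans; 1 << (r-l) is 2 ^ (r-l) (exact: l ≤ r in that branch); int(1e9+7) = 1000000007
def pvLoopA (a : List Int) (target l r ans : Int) : Int :=
  if l ≤ r then
    if pvGet a l + pvGet a r > target then
      pvLoopA a target l (r - 1) ans
    else
      pvLoopA a target (l + 1) r ((ans + 2 ^ (r - l).toNat) % 1000000007)
  else ans
termination_by (r + 1 - l).toNat
decreasing_by all_goals omega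

def numSubseq (nums : List Int) (target : Int) : Int :=
  let a := PySem.List.sorted nums (fun x => x)   -- nums.sort()
  pvLoopA a target 0 ((a.length : Int) - 1) 0

-- ===== PORT B =====
-- the for-loop over range(len(nums)); bisect.bisect_right is PySem.List.bisectRight,
-- pow(2, r-l, MOD) is PySem.Int.powMod; nums[l] with l in range is a.getD l 0 (exact)
def pvLoopB (a : List Int) (target : Int) (l : Nat) (ans : Int) : Int :=
  if l < a.length then
    let r : Int := (PySem.List.bisectRight a (target - a.getD l 0) : Int) - 1
    let ans' : Int :=
      if (l : Int) ≤ r then (ans + PySem.Int.powMod 2 (r - (l : Int)).toNat 1000000007) % 1000000007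
      else ans
    pvLoopB a target (l + 1) ans'
  else ans
termination_by a.length - l

def numSubseq_alt (nums : List Int) (target : Int) : Int :=
  let a := PySem.List.sorted nums (fun x => x)   -- nums.sort()
  pvLoopB a target 0 0

-- ===== PRECONDITION & SPEC =====
def Spec_numSubseq (nums : List Int) (target : Int) (out : Int) : Prop := out = numSubseq_alt nums target
instance (nums : List Int) (target : Int) (out : Int) : Decidable (Spec_numSubseq nums target out) := by unfold Spec_numSubseq; infer_instance

-- ===== CLAIM (what is proved, stated in full; the proofs are below) =====
def Claim_equal_numSubseq : Prop := ∀ (nums : List Int) (target : Int), Dom_numSubseq nums target → Spec_numSubseq nums target (numSubseq nums target)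

-- ===== LEMMAS AND PROOFS =====

-- sorted list: getElem is monotone in the index
theorem pvGetD_mono {a : List Int} (hp : a.Pairwise (· ≤ ·)) {i j : Nat}
    (hij : i ≤ j) (hj : j < a.length) : a.getD i 0 ≤ a.getD j 0 := by
  have hi : i < a.length := lt_of_le_of_lt hij hj
  rw [List.getD_eq_getElem?_getD, List.getD_eq_getElem?_getD,
      List.getElem?_eq_getElem hi, List.getElem?_eq_getElem hj]
  rcases lt_or_eq_of_le hij with h | h
  · exact (List.pairwise_iff_getElem.1 hp) i j hi hj h
  · subst h; simp

-- bisectRight is antitone as the target shrinks, via its spec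
theorem pvBisect_mono {a : List Int} (hp : a.Pairwise (· ≤ ·)) {x y : Int} (hxy : x ≤ y) :
    PySem.List.bisectRight a x ≤ PySem.List.bisectRight a y := by
  by_contra h
  push Not at h
  have hy := PySem.List.bisectRight_spec a y hp
  have hx := PySem.List.bisectRight_spec a x hp
  have hlt : PySem.List.bisectRight a y < a.length := lt_of_lt_of_le h hx.1
  have h1 := hx.2.1 _ hlt h
  have h2 := hy.2.2 _ hlt le_rfl
  omega

-- if a[r] ≤ x then r < bisectRight a x
theorem pvBisect_of_le {a : List Int} (hp : a.Pairwise (· ≤ ·)) {r : Nat} {x : Int}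
    (hr : r < a.length) (h : a.getD r 0 ≤ x) : r < PySem.List.bisectRight a x := by
  by_contra hc
  push Not at hc
  have := (PySem.List.bisectRight_spec a x hp).2.2 r hr hc
  rw [List.getD_eq_getElem?_getD, List.getElem?_eq_getElem hr] at h
  simp at h; omega

-- if x < a[r] then bisectRight a x ≤ r
theorem pvBisect_of_gt {a : List Int} (hp : a.Pairwise (· ≤ ·)) {r : Nat} {x : Int}
    (hr : r < a.length) (h : x < a.getD r 0) : PySem.List.bisectRight a x ≤ r := by
  by_contra hc
  push Not at hc
  have := (PySem.List.bisectRight_spec a x hp).2.1 r hr hc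
  rw [List.getD_eq_getElem?_getD, List.getElem?_eq_getElem hr] at h
  simp at h; omega

theorem pvGet_toNat {a : List Int} {i : Int} (h0 : 0 ≤ i) :
    pvGet a i = a.getD i.toNat 0 := by
  unfold pvGet
  rw [PySem.List.pyGet?_of_nonneg a h0, List.getD_eq_getElem?_getD]

-- once every remaining left index has no valid partner, the B loop is the identity
theorem pvLoopB_stop (a : List Int) (t : Int) :
    ∀ (k l : Nat) (ans : Int), a.length - l = k →
      (∀ j : Nat, l ≤ j → j < a.length → PySem.List.bisectRight a (t - a.getD j 0) ≤ j) →
      pvLoopB a t l ans = ans := by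
  intro k
  induction k with
  | zero =>
    intro l ans hk _
    rw [pvLoopB]
    simp only [if_neg (by omega : ¬ l < a.length)]
  | succ k ih =>
    intro l ans hk h
    rw [pvLoopB]
    by_cases hl : l < a.length
    · simp only [if_pos hl]
      have hb : PySem.List.bisectRight a (t - a.getD l 0) ≤ l := h l le_rfl hl
      rw [if_neg (by omega)]
      exact ih (l + 1) ans (by omega) (fun j hj hjn => h j (by omega) hjn)
    · simp only [if_neg hl]

theorem pvPowModEq (e : Nat) (ans : Int) :
    (ans + PySem.Int.powMod 2 e 1000000007) % 1000000007 = (ans + 2 ^ e) % 1000000007 := by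
  have hm : PySem.Int.powMod 2 e 1000000007 = 2 ^ e % 1000000007 := by
    simp [PySem.Int.powMod, PySem.Int.mod, Int.fmod_eq_emod]
  rw [hm, Int.add_emod ans (2 ^ e % 1000000007), Int.emod_emod_of_dvd _ dvd_rfl, ← Int.add_emod]

-- main invariant lemma: the A loop from (l, r) equals the B loop from l
theorem pvLoop_eq (a : List Int) (t : Int) (hp : a.Pairwise (· ≤ ·)) :
    ∀ (k : Nat) (l r ans : Int), (r + 1 - l).toNat = k →
      0 ≤ l → l ≤ (a.length : Int) → r ≤ (a.length : Int) - 1 →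
      (l < (a.length : Int) →
        (PySem.List.bisectRight a (t - a.getD l.toNat 0) : Int) - 1 ≤ r) →
      pvLoopA a t l r ans = pvLoopB a t l.toNat ans := by
  intro k
  induction k using Nat.strong_induction_on with
  | _ k ih =>
    intro l r ans hk h0 hln hr hinv
    have hl' : ((l.toNat : Int)) = l := Int.toNat_of_nonneg h0
    by_cases hlr : l ≤ r
    · -- loop body runs
      have hl : l < (a.length : Int) := by omega
      have hltn : l.toNat < a.length := by omega
      have hrn : r.toNat < a.length := by omega
      have hr' : ((r.toNat : Int)) = r := Int.toNat_of_nonneg (by omega)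
      have hbinv : (PySem.List.bisectRight a (t - a.getD l.toNat 0) : Int) - 1 ≤ r := hinv hl
      rw [pvLoopA, if_pos hlr, pvGet_toNat h0, pvGet_toNat (by omega)]
      by_cases hgt : a.getD l.toNat 0 + a.getD r.toNat 0 > t
      · -- A drops r; B unchanged
        rw [if_pos hgt]
        have hble : PySem.List.bisectRight a (t - a.getD l.toNat 0) ≤ r.toNat :=
          pvBisect_of_gt hp hrn (by omega)
        exact ih (r - 1 + 1 - l).toNat (by omega) l (r - 1) ans rfl h0 hln (by omega)
          (fun _ => by omega)
      · -- A takes l; B adds the same term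
        rw [if_neg hgt]
        have hbgt : r.toNat < PySem.List.bisectRight a (t - a.getD l.toNat 0) :=
          pvBisect_of_le hp hrn (by omega)
        have hbeq : (PySem.List.bisectRight a (t - a.getD l.toNat 0) : Int) = r + 1 := by omega
        rw [pvLoopB, if_pos hltn]
        simp only [hbeq]
        rw [if_pos (by omega : ((l.toNat : Int)) ≤ r + 1 - 1)]
        have hexp : (r + 1 - 1 - (l.toNat : Int)).toNat = (r - l).toNat := by omega
        rw [hexp, pvPowModEq]
        have hstep : pvLoopA a t (l + 1) r ((ans + 2 ^ (r - l).toNat) % 1000000007)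
            = pvLoopB a t (l + 1).toNat ((ans + 2 ^ (r - l).toNat) % 1000000007) := by
          apply ih (r + 1 - (l + 1)).toNat (by omega) (l + 1) r _ rfl (by omega) (by omega) hr
          intro hl1
          have h1n : (l + 1).toNat = l.toNat + 1 := by omega
          rw [h1n]
          have hmono : a.getD l.toNat 0 ≤ a.getD (l.toNat + 1) 0 :=
            pvGetD_mono hp (by omega) (by omega)
          have hbm : PySem.List.bisectRight a (t - a.getD (l.toNat + 1) 0)
              ≤ PySem.List.bisectRight a (t - a.getD l.toNat 0) :=
            pvBisect_mono hp (by omega)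
          omega
        rw [hstep]
        have h1n : (l + 1).toNat = l.toNat + 1 := by omega
        rw [h1n]
    · -- loop exits: every remaining left index in B contributes nothing
      rw [pvLoopA, if_neg hlr]
      by_cases hl : l < (a.length : Int)
      · refine (pvLoopB_stop a t (a.length - l.toNat) l.toNat ans rfl ?_).symm
        have hbl : (PySem.List.bisectRight a (t - a.getD l.toNat 0) : Int) - 1 ≤ r := hinv hl
        intro j hj hjn
        have hmono : a.getD l.toNat 0 ≤ a.getD j 0 := pvGetD_mono hp hj hjn
        have hbm : PySem.List.bisectRight a (t - a.getD j 0)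
            ≤ PySem.List.bisectRight a (t - a.getD l.toNat 0) :=
          pvBisect_mono hp (by omega)
        omega
      · rw [pvLoopB]
        simp only [if_neg (by omega : ¬ l.toNat < a.length)]

-- ===== VERDICT (by name: the statement is the Claim_ definition above) =====
theorem numSubseq_spec : Claim_equal_numSubseq := by
  intro nums target _
  unfold Spec_numSubseq numSubseq numSubseq_alt
  set a := PySem.List.sorted nums (fun x => x) with ha
  have hp : a.Pairwise (· ≤ ·) := PySem.List.sorted_pairwise nums (fun x => x)
  have h := pvLoop_eq a target hp ((a.length : Int) - 1 + 1 - 0).toNat 0 ((a.length : Int) - 1) 0 rfl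
    (le_refl 0) (by exact_mod_cast Nat.cast_nonneg a.length) (le_refl _)
    (fun hl => by
      have := (PySem.List.bisectRight_spec a (target - a.getD (0:Int).toNat 0) hp).1
      omega)
  simpa using h
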